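-- pv_equiv track=rewrite | github.com/Atomdonat/Python-Repository | Uni/Krypto/zyklische Gruppe/mögliche_Ordnungen_Liste.py | additive_ordnung
-- ===== SOURCE A (Python) =====
-- def additive_ordnung(a, prime, i=0):
--     arr = []
--     for i in range(1, prime+1):
--         c = (a * i) % prime
--         d = str(i) + "*" + str(a) + " ≡ " + str(c)  # + " mod " + str(p)
--         arr.append(d)
--
--         if c == 0:
--             e = len(arr)
--             return arr, "ord(" + str(a) +") = " +  str(e)
-- ===== SOURCE B (Python) =====
-- import math
--
-- def additive_ordnung(a, prime, i=0):
--     if prime <= 0: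
--         return None
--     order = prime // math.gcd(a, prime)
--     arr = ["%d*%d ≡ %d" % (j, a, (a * j) % prime) for j in range(1, order + 1)]
--     return arr, "ord(%d) = %d" % (a, order)
-- ===== Notes on version B (the rewrite author's own statement) =====
-- stated objective: alternative
-- what changed: B computes the stop index in closed form as order = prime // gcd(a, prime) and builds the step strings with a bounded comprehension, instead of A's scan that iterates until (a*i) % prime first hits 0.
import Mathlib
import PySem

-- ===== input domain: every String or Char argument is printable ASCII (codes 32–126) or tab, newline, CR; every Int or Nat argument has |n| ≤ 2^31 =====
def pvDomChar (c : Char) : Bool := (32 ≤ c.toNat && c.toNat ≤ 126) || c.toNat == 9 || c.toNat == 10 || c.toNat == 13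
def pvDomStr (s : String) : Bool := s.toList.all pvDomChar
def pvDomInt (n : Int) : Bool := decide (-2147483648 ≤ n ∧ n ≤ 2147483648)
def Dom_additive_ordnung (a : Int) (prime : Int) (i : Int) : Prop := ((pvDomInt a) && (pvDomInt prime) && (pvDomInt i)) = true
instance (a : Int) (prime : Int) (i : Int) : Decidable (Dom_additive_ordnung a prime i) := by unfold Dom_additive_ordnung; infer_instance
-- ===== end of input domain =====

-- B replaces A's scan-until-zero loop by the closed form order = prime // gcd(a, prime) and a bounded
-- comprehension for the step strings (objective: alternative algorithm, similar cost).

-- ===== PORT A =====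
-- the for-loop `for i in range(1, prime+1)` with early return, as a counting recursion (Python's
-- range is lazy, so the loop is ported as a counter i with fuel = number of remaining iterations);
-- `arr` is the accumulator, `none` = falling off the end (Python's implicit None)
def additive_ordnung_loop (a : Int) (prime : Int) : Nat → Int → List String → Option (List String × String)
  | 0, _, _ => none
  | fuel + 1, i, arr =>
    let c := PySem.Int.mod (a * i) prime
    let d := PySem.Int.toStr i ++ "*" ++ PySem.Int.toStr a ++ " ≡ " ++ PySem.Int.toStr c
    let arr' := arr ++ [d]
    if c = 0 then
      some (arr', "ord(" ++ PySem.Int.toStr a ++ ") = " ++ PySem.Int.toStr (arr'.length : Int))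
    else additive_ordnung_loop a prime fuel (i + 1) arr'

def additive_ordnung (a : Int) (prime : Int) (i : Int) : Option (List String × String) :=
  additive_ordnung_loop a prime prime.toNat 1 []

-- ===== PORT B =====
def additive_ordnung_alt (a : Int) (prime : Int) (i : Int) : Option (List String × String) :=
  if prime ≤ 0 then none
  else
    let order := PySem.Int.floordiv prime ((Int.gcd a prime : Nat) : Int)
    let arr := (PySem.List.pyRange 1 (order + 1) 1).map
      (fun j => PySem.Int.toStr j ++ "*" ++ PySem.Int.toStr a ++ " ≡ " ++ PySem.Int.toStr (PySem.Int.mod (a * j) prime))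
    some (arr, "ord(" ++ PySem.Int.toStr a ++ ") = " ++ PySem.Int.toStr order)

-- ===== PRECONDITION & SPEC =====
def Spec_additive_ordnung (a : Int) (prime : Int) (i : Int) (out : Option (List String × String)) : Prop := out = additive_ordnung_alt a prime i
instance (a : Int) (prime : Int) (i : Int) (out : Option (List String × String)) : Decidable (Spec_additive_ordnung a prime i out) := by unfold Spec_additive_ordnung; infer_instance

-- ===== CLAIM (what is proved, stated in full; the proofs are below) =====
def Claim_equal_additive_ordnung : Prop := ∀ (a : Int) (prime : Int) (i : Int), Dom_additive_ordnung a prime i → Spec_additive_ordnung a prime i (additive_ordnung a prime i)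

-- ===== LEMMAS AND PROOFS =====

-- running A's loop from index k: it stops exactly at `ord`, the first zero of (a*i) % prime
theorem additive_ordnung_loop_run (a prime ord : Int) (hordle : ord ≤ prime)
    (hz : PySem.Int.mod (a * ord) prime = 0)
    (hnz : ∀ j : Int, 1 ≤ j → j < ord → PySem.Int.mod (a * j) prime ≠ 0) :
    ∀ (n : Nat) (k : Int) (acc : List String), k + n = ord → 1 ≤ k →
      acc.length = (k - 1).toNat →
      additive_ordnung_loop a prime (prime + 1 - k).toNat k acc =
        some (acc ++ (PySem.List.pyRange k (ord + 1) 1).map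
            (fun j => PySem.Int.toStr j ++ "*" ++ PySem.Int.toStr a ++ " ≡ " ++ PySem.Int.toStr (PySem.Int.mod (a * j) prime)),
          "ord(" ++ PySem.Int.toStr a ++ ") = " ++ PySem.Int.toStr ord) := by
  intro n
  induction n with
  | zero =>
    intro k acc hk hk1 hlen
    have hkord : k = ord := by omega
    subst hkord
    rw [show (prime + 1 - k).toNat = (prime - k).toNat + 1 by omega, additive_ordnung_loop]
    simp only [hz, if_true, PySem.List.pyRange_one_singleton,
      List.map_cons, List.map_nil]
    have hlen' : ((acc ++ [PySem.Int.toStr k ++ "*" ++ PySem.Int.toStr a ++ " ≡ " ++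
        PySem.Int.toStr 0]).length : Int) = k := by
      simp [List.length_append, hlen]; omega
    rw [hlen']
  | succ m ih =>
    intro k acc hk hk1 hlen
    have hklt : k < ord := by omega
    rw [show (prime + 1 - k).toNat = (prime + 1 - (k + 1)).toNat + 1 by omega,
      additive_ordnung_loop]
    simp only [if_neg (hnz k hk1 hklt)]
    rw [ih (k + 1) _ (by omega) (by omega) (by simp [List.length_append, hlen]; omega)]
    rw [PySem.List.pyRange_one_cons (show k < ord + 1 by omega)]
    simp

theorem additive_ordnung_eq (a prime i : Int) :
    additive_ordnung a prime i = additive_ordnung_alt a prime i := by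
  by_cases hp : prime ≤ 0
  · rw [additive_ordnung, additive_ordnung_alt, if_pos hp,
      show prime.toNat = 0 by omega, additive_ordnung_loop]
  · push_neg at hp
    set g : Int := ((Int.gcd a prime : Nat) : Int) with hgdef
    have hgne : Int.gcd a prime ≠ 0 := by
      intro h
      exact absurd (Int.gcd_eq_zero_iff.mp h).2 (by omega)
    have hg : 0 < g := by rw [hgdef]; exact_mod_cast Nat.pos_of_ne_zero hgne
    have hgdp : g ∣ prime := by rw [hgdef]; exact Int.gcd_dvd_right a prime
    have hgda : g ∣ a := by rw [hgdef]; exact Int.gcd_dvd_left a prime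
    set ord : Int := prime / g with horddef
    have hordmul : ord * g = prime := Int.ediv_mul_cancel hgdp
    have hord1 : 1 ≤ ord := by nlinarith
    have hordle : ord ≤ prime := by nlinarith
    have hz : PySem.Int.mod (a * ord) prime = 0 := by
      rw [PySem.Int.mod_eq_emod_of_pos hp]
      refine Int.emod_eq_zero_of_dvd ⟨a / g, ?_⟩
      rw [← hordmul]
      rw [mul_comm a ord, mul_comm (ord * g)]
      rw [mul_comm ord g, ← mul_assoc, Int.ediv_mul_cancel hgda, mul_comm]
    have hnz : ∀ j : Int, 1 ≤ j → j < ord → PySem.Int.mod (a * j) prime ≠ 0 := by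
      intro j hj1 hjlt hcon
      rw [PySem.Int.mod_eq_emod_of_pos hp] at hcon
      have hdvd : prime ∣ a * j := Int.dvd_of_emod_eq_zero hcon
      -- divide the divisibility by g
      have hdvd' : ord ∣ (a / g) * j := by
        rcases hdvd with ⟨t, ht⟩
        refine ⟨t, ?_⟩
        have h1 : g * ((a / g) * j) = a * j := by
          rw [← mul_assoc, Int.mul_ediv_cancel' hgda]
        have h2 : g * (ord * t) = prime * t := by
          rw [← mul_assoc, mul_comm g ord, hordmul]
        exact mul_left_cancel₀ (show g ≠ 0 by omega) (by rw [h1, h2, ht])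
      have hcop : IsCoprime ord (a / g) := by
        rw [Int.isCoprime_iff_gcd_eq_one, Int.gcd_comm]
        exact Int.gcd_div_gcd_div_gcd (Nat.pos_of_ne_zero hgne)
      have : ord ∣ j := (hcop.dvd_of_dvd_mul_left (mul_comm (a / g) j ▸ hdvd'))
      have := Int.le_of_dvd (by omega) this
      omega
    rw [additive_ordnung, additive_ordnung_alt, if_neg (by omega)]
    have hfd : PySem.Int.floordiv prime g = ord := by
      rw [PySem.Int.floordiv_eq_ediv_of_pos hg]
    rw [← hgdef]
    simp only [hfd]
    have hrun := additive_ordnung_loop_run a prime ord hordle hz hnz (ord - 1).toNat 1 []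
      (by omega) (by omega) (by simp)
    rw [show prime.toNat = (prime + 1 - 1).toNat by omega, hrun]
    simp

-- ===== VERDICT (by name: the statement is the Claim_ definition above) =====
theorem additive_ordnung_spec : Claim_equal_additive_ordnung := by
  intro a prime i _
  exact additive_ordnung_eq a prime i
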